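-- pv_equiv track=rewrite | github.com/mellinkarl/AgenticHelloWorld | backend/src/composite_agents/test_graph/graph.py | _route_from_letters
-- ===== SOURCE A (Python) =====
-- def _route_from_letters(letters: str) -> str:
--     """Return TRIPLE / DOUBLE / NONE based on consecutive runs."""
--     if not letters:
--         return "NONE"
--     runs, streak = [], 1
--     for i in range(1, len(letters)):
--         if letters[i] == letters[i - 1]:
--             streak += 1
--         else:
--             runs.append(streak)
--             streak = 1
--     runs.append(streak)
--     if any(r >= 3 for r in runs):
--         return "TRIPLE"
--     if any(r == 2 for r in runs):
--         return "DOUBLE"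
--     return "NONE"
-- ===== SOURCE B (Python) =====
-- import re
--
-- def _route_from_letters(letters: str) -> str:
--     """Return TRIPLE / DOUBLE / NONE based on consecutive runs."""
--     if re.search(r'(.)\1\1', letters, re.DOTALL):
--         return "TRIPLE"
--     if re.search(r'(.)\1', letters, re.DOTALL):
--         return "DOUBLE"
--     return "NONE"
-- ===== Notes on version B (the rewrite author's own statement) =====
-- stated objective: idiomatic
-- what changed: Replaces the explicit index loop that builds a list of run lengths with two regex backreference searches: '(.)\1\1' for a triple and '(.)\1' for a double, with re.DOTALL so newlines behave like any character.
import Mathlib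
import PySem

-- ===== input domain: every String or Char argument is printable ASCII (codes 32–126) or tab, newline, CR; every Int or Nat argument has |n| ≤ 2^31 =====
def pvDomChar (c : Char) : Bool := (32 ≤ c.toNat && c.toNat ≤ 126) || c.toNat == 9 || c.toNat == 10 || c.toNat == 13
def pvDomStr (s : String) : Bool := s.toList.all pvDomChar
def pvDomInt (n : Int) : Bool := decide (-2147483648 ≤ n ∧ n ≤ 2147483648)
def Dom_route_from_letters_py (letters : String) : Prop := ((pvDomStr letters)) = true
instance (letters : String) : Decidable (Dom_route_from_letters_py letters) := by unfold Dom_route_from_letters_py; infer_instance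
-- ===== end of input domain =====

-- B replaces A's explicit run-length loop with the two regex backreference searches
-- re.search(r'(.)\1\1') / re.search(r'(.)\1') (idiomatic; same O(n) cost).

-- ===== PORT A =====
-- A's loop over range(1, len(letters)) with state (runs, streak), then the two any(...) checks.
def route_from_letters_py (letters : String) : String :=
  let cs := letters.toList
  if cs.isEmpty then "NONE"
  else
    let st := (PySem.List.pyRange 1 (PySem.List.len cs) 1).foldl
      (fun (st : List Int × Int) i =>
        if PySem.List.pyGetD cs i ' ' = PySem.List.pyGetD cs (i - 1) ' ' then
          (st.1, st.2 + 1)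
        else
          (st.1 ++ [st.2], 1)) ([], 1)
    let runs := st.1 ++ [st.2]
    if runs.any (fun r => 3 ≤ r) then "TRIPLE"
    else if runs.any (fun r => r == 2) then "DOUBLE"
    else "NONE"

-- ===== PORT B =====
-- re.search(r'(.)\1\1', s, re.DOTALL) matches iff s has three consecutive equal characters
-- (re.DOTALL makes '.' match every character, newlines included); ported exactly as that
-- adjacent-window existence check. Likewise '(.)\1' for two consecutive equal characters.
def pvHasTriple : List Char → Bool
  | a :: b :: c :: rest => (a == b && b == c) || pvHasTriple (b :: c :: rest)
  | _ => false

def pvHasDouble : List Char → Bool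
  | a :: b :: rest => (a == b) || pvHasDouble (b :: rest)
  | _ => false

def route_from_letters_py_alt (letters : String) : String :=
  if pvHasTriple letters.toList then "TRIPLE"
  else if pvHasDouble letters.toList then "DOUBLE"
  else "NONE"

-- ===== PRECONDITION & SPEC =====
def Spec_route_from_letters_py (letters : String) (out : String) : Prop := out = route_from_letters_py_alt letters
instance (letters : String) (out : String) : Decidable (Spec_route_from_letters_py letters out) := by unfold Spec_route_from_letters_py; infer_instance

-- ===== CLAIM (what is proved, stated in full; the proofs are below) =====
def Claim_equal_route_from_letters_py : Prop := ∀ (letters : String), Dom_route_from_letters_py letters → Spec_route_from_letters_py letters (route_from_letters_py letters)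

-- ===== LEMMAS AND PROOFS =====

-- Structural form of A's loop body: previous char, runs so far, current streak, remaining chars.
def pvLoop : Char → List Int → Int → List Char → List Int × Int
  | _, acc, k, [] => (acc, k)
  | c, acc, k, d :: rest => if d = c then pvLoop d acc (k + 1) rest else pvLoop d (acc ++ [k]) 1 rest

-- streak-carrying forms of the two any(...) checks
def pvTripK : Char → Int → List Char → Bool
  | _, k, [] => decide (3 ≤ k)
  | c, k, d :: rest => if d = c then pvTripK d (k + 1) rest else (decide (3 ≤ k) || pvTripK d 1 rest)

def pvEq2K : Char → Int → List Char → Bool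
  | _, k, [] => k == 2
  | c, k, d :: rest => if d = c then pvEq2K d (k + 1) rest else ((k == 2) || pvEq2K d 1 rest)

def pvDblK : Char → Int → List Char → Bool
  | _, k, [] => decide (2 ≤ k)
  | c, k, d :: rest => if d = c then pvDblK d (k + 1) rest else (decide (2 ≤ k) || pvDblK d 1 rest)

theorem pvLoop_acc : ∀ (rest : List Char) (c : Char) (acc : List Int) (k : Int),
    pvLoop c acc k rest = (acc ++ (pvLoop c [] k rest).1, (pvLoop c [] k rest).2) := by
  intro rest
  induction rest with
  | nil => intro c acc k; simp [pvLoop]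
  | cons d rest ih =>
      intro c acc k
      by_cases h : d = c
      · simp only [pvLoop, if_pos h]
        exact ih d acc (k + 1)
      · simp only [pvLoop, if_neg h, List.nil_append]
        rw [ih d (acc ++ [k]) 1, ih d [k] 1]
        simp

theorem pvLoop_trip : ∀ (rest : List Char) (c : Char) (k : Int),
    ((pvLoop c [] k rest).1 ++ [(pvLoop c [] k rest).2]).any (fun r => 3 ≤ r)
      = pvTripK c k rest := by
  intro rest
  induction rest with
  | nil => intro c k; simp [pvLoop, pvTripK]
  | cons d rest ih =>
      intro c k
      by_cases h : d = c
      · simp only [pvLoop, pvTripK, if_pos h]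
        exact ih d (k + 1)
      · simp only [pvLoop, pvTripK, if_neg h, List.nil_append]
        rw [pvLoop_acc rest d [k] 1, ← ih d 1]
        simp [List.any_append]

theorem pvLoop_eq2 : ∀ (rest : List Char) (c : Char) (k : Int),
    ((pvLoop c [] k rest).1 ++ [(pvLoop c [] k rest).2]).any (fun r => r == 2)
      = pvEq2K c k rest := by
  intro rest
  induction rest with
  | nil => intro c k; simp [pvLoop, pvEq2K]
  | cons d rest ih =>
      intro c k
      by_cases h : d = c
      · simp only [pvLoop, pvEq2K, if_pos h]
        exact ih d (k + 1)
      · simp only [pvLoop, pvEq2K, if_neg h, List.nil_append]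
        rw [pvLoop_acc rest d [k] 1, ← ih d 1]
        simp [List.any_append]

-- when the streak cannot reach 3, checking r == 2 is checking 2 ≤ r
theorem pvEq2_bool (k : Int) (h : k < 3) : (k == 2) = decide (2 ≤ k) := by
  by_cases h2 : k = 2
  · subst h2; decide
  · rw [show (k == 2) = false from by simpa using h2, decide_eq_false (by omega)]

theorem pvEq2_of_no_trip : ∀ (rest : List Char) (c : Char) (k : Int),
    pvTripK c k rest = false → pvEq2K c k rest = pvDblK c k rest := by
  intro rest
  induction rest with
  | nil =>
      intro c k h
      simp only [pvTripK, decide_eq_false_iff_not, not_le] at h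
      simp only [pvEq2K, pvDblK]
      exact pvEq2_bool k h
  | cons d rest ih =>
      intro c k h
      by_cases hd : d = c
      · subst hd
        simp only [pvTripK] at h
        simp only [pvEq2K, pvDblK]
        exact ih _ _ h
      · simp only [pvTripK, if_neg hd, Bool.or_eq_false_iff, decide_eq_false_iff_not, not_le] at h
        simp only [pvEq2K, pvDblK, if_neg hd, ih _ _ h.2]
        rw [pvEq2_bool k h.1]

-- a streak already ≥ 3 (resp. ≥ 2) makes the check true regardless of the rest
theorem pvTripK_of_ge : ∀ (rest : List Char) (c : Char) (k : Int), 3 ≤ k → pvTripK c k rest = true := by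
  intro rest
  induction rest with
  | nil => intro c k h; simp [pvTripK, h]
  | cons d rest ih =>
      intro c k h
      by_cases hd : d = c
      · simp only [pvTripK, if_pos hd]; exact ih _ _ (by omega)
      · simp [pvTripK, if_neg hd, h]

theorem pvDblK_of_ge : ∀ (rest : List Char) (c : Char) (k : Int), 2 ≤ k → pvDblK c k rest = true := by
  intro rest
  induction rest with
  | nil => intro c k h; simp [pvDblK, h]
  | cons d rest ih =>
      intro c k h
      by_cases hd : d = c
      · simp only [pvDblK, if_pos hd]; exact ih _ _ (by omega)
      · simp [pvDblK, if_neg hd, h]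

-- pvTripK with streak 1 (and 2) is B's triple search
theorem pvTripK_eq_hasTriple : ∀ (rest : List Char) (c : Char),
    pvTripK c 1 rest = pvHasTriple (c :: rest) ∧ pvTripK c 2 rest = pvHasTriple (c :: c :: rest) := by
  intro rest
  induction rest with
  | nil => intro c; constructor <;> simp [pvTripK, pvHasTriple]
  | cons d rest ih =>
      intro c
      constructor
      · by_cases hd : d = c
        · subst hd
          simp only [pvTripK]
          rw [if_pos trivial, show (1 : Int) + 1 = 2 from by norm_num, (ih d).2]
        · have hcd : (c == d) = false := by simpa using fun hh : c = d => hd hh.symm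
          simp only [pvTripK]
          rw [if_neg hd, show decide ((3 : Int) ≤ 1) = false from by decide, Bool.false_or, (ih d).1]
          cases rest with
          | nil => simp [pvHasTriple]
          | cons e r => simp [pvHasTriple, hcd]
      · by_cases hd : d = c
        · subst hd
          simp only [pvTripK]
          rw [if_pos trivial, show (2 : Int) + 1 = 3 from by norm_num, pvTripK_of_ge rest d 3 (by omega)]
          simp [pvHasTriple]
        · have hcd : (c == d) = false := by simpa using fun hh : c = d => hd hh.symm
          simp only [pvTripK]
          rw [if_neg hd, show decide ((3 : Int) ≤ 2) = false from by decide, Bool.false_or, (ih d).1]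
          have hstep2 : pvHasTriple (c :: d :: rest) = pvHasTriple (d :: rest) := by
            cases rest with
            | nil => simp [pvHasTriple]
            | cons e r => simp [pvHasTriple, hcd]
          have hstep : pvHasTriple (c :: c :: d :: rest) = pvHasTriple (c :: d :: rest) := by
            simp [pvHasTriple, hcd, hstep2]
          rw [hstep, hstep2]

-- pvDblK with streak 1 is B's double search
theorem pvDblK_eq_hasDouble : ∀ (rest : List Char) (c : Char),
    pvDblK c 1 rest = pvHasDouble (c :: rest) := by
  intro rest
  induction rest with
  | nil => intro c; simp [pvDblK, pvHasDouble]
  | cons d rest ih =>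
      intro c
      by_cases hd : d = c
      · subst hd
        simp only [pvDblK]
        rw [if_pos trivial, show (1 : Int) + 1 = 2 from by norm_num, pvDblK_of_ge rest d 2 (by omega)]
        simp [pvHasDouble]
      · have hcd : (c == d) = false := by simpa using fun hh : c = d => hd hh.symm
        simp only [pvDblK]
        rw [if_neg hd, show decide ((2 : Int) ≤ 1) = false from by decide, Bool.false_or, ih d]
        simp [pvHasDouble, hcd]

-- A's fold over range(1, len) is the structural loop pvLoop
theorem pvFold_eq_loop (cs : List Char) :
    ∀ (m : Nat) (a : Int) (acc : List Int) (k : Int), 1 ≤ a → a.toNat + m = cs.length →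
      (PySem.List.pyRange a (PySem.List.len cs) 1).foldl
        (fun (st : List Int × Int) i =>
          if PySem.List.pyGetD cs i ' ' = PySem.List.pyGetD cs (i - 1) ' ' then (st.1, st.2 + 1)
          else (st.1 ++ [st.2], 1)) (acc, k)
        = pvLoop (cs.getD (a.toNat - 1) ' ') acc k (cs.drop a.toNat) := by
  intro m
  induction m with
  | zero =>
      intro a acc k ha hlen
      have hae : a = (cs.length : Int) := by omega
      rw [PySem.List.len_eq, hae, PySem.List.pyRange_one_eq_nil (by omega),
        List.drop_eq_nil_of_le (by omega)]
      rfl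
  | succ m ih =>
      intro a acc k ha hlen
      have hlt : a < (cs.length : Int) := by omega
      have hna : a.toNat < cs.length := by omega
      rw [PySem.List.len_eq, PySem.List.pyRange_one_cons hlt, List.foldl_cons]
      have hga : PySem.List.pyGetD cs a ' ' = cs[a.toNat]'hna :=
        PySem.List.pyGetD_eq_getElem cs ' ' (by omega) hlt
      have hga1 : PySem.List.pyGetD cs (a - 1) ' ' = cs.getD (a.toNat - 1) ' ' := by
        rw [show a - 1 = ((a.toNat - 1 : Nat) : Int) from by omega, PySem.List.pyGetD_natCast]
      have hdrop : cs.drop a.toNat = cs[a.toNat]'hna :: cs.drop (a.toNat + 1) :=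
        List.drop_eq_getElem_cons hna
      have hih := ih (a + 1) 
      simp only [hga, hga1]
      rw [hdrop]
      by_cases hc : cs[a.toNat]'hna = cs.getD (a.toNat - 1) ' '
      · rw [if_pos hc]
        have h2 := ih (a + 1) acc (k + 1) (by omega) (by omega)
        rw [PySem.List.len_eq, show (a + 1).toNat - 1 = a.toNat from by omega,
          show (a + 1).toNat = a.toNat + 1 from by omega,
          List.getD_eq_getElem cs ' ' hna] at h2
        simp only [pvLoop]
        rw [if_pos hc]
        exact h2
      · rw [if_neg hc]
        have h2 := ih (a + 1) (acc ++ [k]) 1 (by omega) (by omega)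
        rw [PySem.List.len_eq, show (a + 1).toNat - 1 = a.toNat from by omega,
          show (a + 1).toNat = a.toNat + 1 from by omega,
          List.getD_eq_getElem cs ' ' hna] at h2
        simp only [pvLoop]
        rw [if_neg hc]
        exact h2

-- ===== VERDICT (by name: the statement is the Claim_ definition above) =====
theorem route_from_letters_py_spec : Claim_equal_route_from_letters_py := by
  intro letters _
  unfold Spec_route_from_letters_py route_from_letters_py route_from_letters_py_alt
  cases hcs : letters.toList with
  | nil => simp [pvHasTriple, pvHasDouble]
  | cons c rest =>
      have hfold := pvFold_eq_loop (c :: rest) rest.length 1 [] 1 (by omega) (by simp; omega)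
      rw [show ((1 : Int).toNat - 1) = 0 from rfl, show ((1 : Int).toNat) = 1 from rfl,
        List.getD_cons_zero, List.drop_one, List.tail_cons] at hfold
      simp only [List.isEmpty_cons]
      rw [if_neg (by simp : ¬(false = true)), hfold,
        pvLoop_trip rest c 1, pvLoop_eq2 rest c 1, (pvTripK_eq_hasTriple rest c).1]
      by_cases ht : pvHasTriple (c :: rest) = true
      · simp [ht]
      · have ht2 : pvTripK c 1 rest = false := by
          rw [(pvTripK_eq_hasTriple rest c).1]; exact Bool.eq_false_iff.mpr ht
        rw [pvEq2_of_no_trip rest c 1 ht2, pvDblK_eq_hasDouble rest c]
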